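-- pv_equiv track=rewrite | github.com/fbotis/soniox_transcriber | src/soniox_transcriber/transcriber.py | render_tokens
-- ===== SOURCE A (Python) =====
-- from typing import Optional
--
-- def render_tokens(final_tokens: list[dict], non_final_tokens: list[dict]) -> str:
--     """Convert tokens into readable transcript."""
--     text_parts: list[str] = []
--     current_speaker: Optional[str] = None
--     current_language: Optional[str] = None
--
--     # Process all tokens in order
--     for token in final_tokens + non_final_tokens:
--         text = token["text"]
--         speaker = token.get("speaker")
--         language = token.get("language")
--
--         # Speaker changed -> add a speaker tag
--         if speaker is not None and speaker != current_speaker: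
--             if current_speaker is not None:
--                 text_parts.append("\n\n")
--             current_speaker = speaker
--             current_language = None
--             text_parts.append(f"Speaker {current_speaker}:")
--
--         # Language changed -> add a language tag
--         if language is not None and language != current_language:
--             current_language = language
--             text_parts.append(f"\n[{current_language}] ")
--             text = text.lstrip()
--
--         text_parts.append(text)
--
--     return "".join(text_parts)
-- ===== SOURCE B (Python) =====
-- def render_tokens(final_tokens: list[dict], non_final_tokens: list[dict]) -> str:
--     """Convert tokens into readable transcript (group-by-speaker, then render)."""
--     # Pass 1: group tokens into consecutive speaker segments.
--     segments: list[tuple] = []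
--     cur_speaker = None
--     cur_toks: list[dict] = []
--     for token in final_tokens + non_final_tokens:
--         speaker = token.get("speaker")
--         if speaker is not None and speaker != cur_speaker:
--             if cur_toks:
--                 segments.append((cur_speaker, cur_toks))
--             cur_speaker = speaker
--             cur_toks = [token]
--         else:
--             cur_toks.append(token)
--     segments.append((cur_speaker, cur_toks))
--
--     # Pass 2: render each segment.
--     parts: list[str] = []
--     header_emitted = False
--     for speaker, toks in segments:
--         if speaker is not None:
--             if header_emitted:
--                 parts.append("\n\n")
--             header_emitted = True
--             parts.append("Speaker " + speaker + ":")
--         lang = None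
--         for t in toks:
--             text = t["text"]
--             lg = t.get("language")
--             if lg is not None and lg != lang:
--                 lang = lg
--                 parts.append("\n[" + lg + "] ")
--                 text = text.lstrip()
--             parts.append(text)
--     return "".join(parts)
-- ===== Notes on version B (the rewrite author's own statement) =====
-- stated objective: alternative
-- what changed: A's single stateful loop (speaker+language state interleaved per token) is replaced by two passes: first group tokens into consecutive speaker segments, then render each segment (separator/header, fresh language state machine per segment).
-- outside the precondition, e.g. on render_tokens([{'speaker': '1'}], []): A raises KeyError, B raises KeyError
import Mathlib
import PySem

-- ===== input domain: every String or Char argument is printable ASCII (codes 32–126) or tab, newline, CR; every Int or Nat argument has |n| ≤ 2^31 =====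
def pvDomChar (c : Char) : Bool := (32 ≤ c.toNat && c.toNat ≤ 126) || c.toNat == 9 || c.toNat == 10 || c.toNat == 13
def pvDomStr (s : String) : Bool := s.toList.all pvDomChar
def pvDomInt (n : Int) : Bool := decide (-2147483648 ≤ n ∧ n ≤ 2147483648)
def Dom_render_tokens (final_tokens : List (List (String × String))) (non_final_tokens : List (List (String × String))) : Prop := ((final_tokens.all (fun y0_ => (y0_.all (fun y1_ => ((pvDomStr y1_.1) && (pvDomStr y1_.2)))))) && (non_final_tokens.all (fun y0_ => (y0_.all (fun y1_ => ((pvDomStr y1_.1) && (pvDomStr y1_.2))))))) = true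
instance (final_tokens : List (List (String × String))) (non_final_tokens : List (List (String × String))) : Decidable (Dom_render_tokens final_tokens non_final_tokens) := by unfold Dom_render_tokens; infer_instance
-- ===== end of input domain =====

-- B restructures A's single stateful loop into two passes (group tokens into consecutive
-- speaker segments, then render each segment); same cost, objective: alternative decomposition.
-- A raises KeyError when a token lacks the "text" key; Pre_ excludes exactly those inputs.

-- ===== PORT A =====
-- token.get(k) on the association list: first match (dict lookup)
def tokGet (token : List (String × String)) (k : String) : Option String :=
  (token.find? (fun p => p.1 == k)).map (·.2)

-- one iteration of A's loop; state = (text_parts, current_speaker, current_language)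
def aStep (st : List String × Option String × Option String)
    (token : List (String × String)) : List String × Option String × Option String :=
  let text := (tokGet token "text").getD ""
  let speaker := tokGet token "speaker"
  let language := tokGet token "language"
  let (parts, cs, cl) := st
  let (parts1, cs1, cl1) :=
    match speaker with
    | some s =>
        if some s ≠ cs then
          (parts ++ (if cs ≠ none then ["\n\n"] else []) ++ ["Speaker " ++ s ++ ":"],
           some s, (none : Option String))
        else (parts, cs, cl)
    | none => (parts, cs, cl)
  let (parts2, cl2, text2) :=
    match language with
    | some l =>
        if some l ≠ cl1 then
          (parts1 ++ ["\n[" ++ l ++ "] "], some l, PySem.Str.lstrip text)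
        else (parts1, cl1, text)
    | none => (parts1, cl1, text)
  (parts2 ++ [text2], cs1, cl2)

def render_tokens (final_tokens : List (List (String × String))) (non_final_tokens : List (List (String × String))) : String :=
  String.join ((final_tokens ++ non_final_tokens).foldl aStep ([], none, none)).1

-- ===== PORT B =====
-- pass 1 step: extend/flush the current speaker segment
def gStep (st : List (Option String × List (List (String × String))) × Option String × List (List (String × String)))
    (token : List (String × String)) :
    List (Option String × List (List (String × String))) × Option String × List (List (String × String)) :=
  let (segs, csp, ctoks) := st
  match tokGet token "speaker" with
  | some s =>
      if some s ≠ csp then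
        ((if ctoks ≠ [] then segs ++ [(csp, ctoks)] else segs), some s, [token])
      else (segs, csp, ctoks ++ [token])
  | none => (segs, csp, ctoks ++ [token])

-- pass 2 inner loop: language state machine within one segment
def langStep (st : List String × Option String) (t : List (String × String)) :
    List String × Option String :=
  let (parts, lang) := st
  let text := (tokGet t "text").getD ""
  match tokGet t "language" with
  | some l =>
      if some l ≠ lang then
        (parts ++ ["\n[" ++ l ++ "] "] ++ [PySem.Str.lstrip text], some l)
      else (parts ++ [text], lang)
  | none => (parts ++ [text], lang)

-- pass 2 outer loop: header/separator, then the segment's tokens; state = (parts, header_emitted)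
def segStep (st : List String × Bool) (seg : Option String × List (List (String × String))) :
    List String × Bool :=
  let (parts, he) := st
  let (parts1, he1) :=
    match seg.1 with
    | some s => (parts ++ (if he then ["\n\n"] else []) ++ ["Speaker " ++ s ++ ":"], true)
    | none => (parts, he)
  ((seg.2.foldl langStep (parts1, none)).1, he1)

def render_tokens_alt (final_tokens : List (List (String × String))) (non_final_tokens : List (List (String × String))) : String :=
  let (segs, csp, ctoks) := (final_tokens ++ non_final_tokens).foldl gStep ([], none, [])
  String.join (((segs ++ [(csp, ctoks)]).foldl segStep ([], false)).1)

-- ===== PRECONDITION & SPEC =====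
-- A raises KeyError on token["text"] for a token without the "text" key; Pre_ excludes exactly those inputs.
def Pre_render_tokens (final_tokens : List (List (String × String))) (non_final_tokens : List (List (String × String))) : Prop :=
  ∀ t ∈ final_tokens ++ non_final_tokens, (tokGet t "text").isSome = true
instance (final_tokens : List (List (String × String))) (non_final_tokens : List (List (String × String))) : Decidable (Pre_render_tokens final_tokens non_final_tokens) := by unfold Pre_render_tokens; infer_instance

def pvWitness_render_tokens : (List (List (String × String))) × (List (List (String × String))) :=
  ([[("text", "hello"), ("speaker", "1"), ("language", "en")], [("text", " there")]],
   [[("text", " maybe"), ("speaker", "2"), ("language", "de")]])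

def Spec_render_tokens (final_tokens : List (List (String × String))) (non_final_tokens : List (List (String × String))) (out : String) : Prop := out = render_tokens_alt final_tokens non_final_tokens
instance (final_tokens : List (List (String × String))) (non_final_tokens : List (List (String × String))) (out : String) : Decidable (Spec_render_tokens final_tokens non_final_tokens out) := by unfold Spec_render_tokens; infer_instance

-- ===== CLAIM (what is proved, stated in full; the proofs are below) =====
def Claim_equal_render_tokens : Prop := ∀ (final_tokens : List (List (String × String))) (non_final_tokens : List (List (String × String))), Dom_render_tokens final_tokens non_final_tokens → Pre_render_tokens final_tokens non_final_tokens → Spec_render_tokens final_tokens non_final_tokens (render_tokens final_tokens non_final_tokens)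

-- ===== LEMMAS AND PROOFS =====

def renderOut (st : List (Option String × List (List (String × String))) × Option String × List (List (String × String))) : List String :=
  ((st.1 ++ [(st.2.1, st.2.2)]).foldl segStep ([], false)).1

-- the header/separator prefix pass 2 emits for a segment with speaker csp, given render state R
def hdrApply (R : List String × Bool) (csp : Option String) : List String × Bool :=
  match csp with
  | some s => (R.1 ++ (if R.2 then ["\n\n"] else []) ++ ["Speaker " ++ s ++ ":"], true)
  | none => R

-- language handling of one token, as both loops perform it
theorem aStep_keep (p : List String) (cs cl : Option String) (t : List (String × String))
    (h : tokGet t "speaker" = none ∨ tokGet t "speaker" = cs) :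
    aStep (p, cs, cl) t = ((langStep (p, cl) t).1, cs, (langStep (p, cl) t).2) := by
  rcases h with h | h
  · simp [aStep, langStep, h]
    cases tokGet t "language" with
    | none => simp
    | some l => simp; split <;> simp
  · cases hs : tokGet t "speaker" with
    | none =>
      simp [aStep, langStep, hs]
      cases tokGet t "language" with
      | none => simp
      | some l => simp; split <;> simp
    | some s =>
      rw [hs] at h
      simp [aStep, langStep, hs, ← h]
      cases tokGet t "language" with
      | none => simp
      | some l => simp; split <;> simp

theorem aStep_new (p : List String) (cs cl : Option String) (t : List (String × String)) (s : String)
    (hs : tokGet t "speaker" = some s) (hne : some s ≠ cs) :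
    aStep (p, cs, cl) t =
      ((langStep (p ++ (if cs ≠ none then ["\n\n"] else []) ++ ["Speaker " ++ s ++ ":"], none) t).1,
       some s,
       (langStep (p ++ (if cs ≠ none then ["\n\n"] else []) ++ ["Speaker " ++ s ++ ":"], none) t).2) := by
  simp [aStep, langStep, hs, hne]
  cases tokGet t "language" <;> simp

theorem segStep_parts (R : List String × Bool) (csp : Option String)
    (toks : List (List (String × String))) :
    (segStep R (csp, toks)).1 = (toks.foldl langStep ((hdrApply R csp).1, none)).1 := by
  cases csp <;> simp [segStep, hdrApply]

theorem segStep_flag (R : List String × Bool) (csp : Option String)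
    (toks : List (List (String × String))) :
    (segStep R (csp, toks)).2 = (match csp with | some _ => true | none => R.2) := by
  cases csp <;> simp [segStep]

theorem key_invariant (ts : List (List (String × String))) :
    ∀ (segs : List (Option String × List (List (String × String))))
      (csp : Option String) (ctoks : List (List (String × String))),
      ((segs.foldl segStep ([], false)).2 = true → csp ≠ none) →
      (csp ≠ none → ctoks ≠ []) →
      (ts.foldl aStep
          ((ctoks.foldl langStep ((hdrApply (segs.foldl segStep ([], false)) csp).1, none)).1, csp,
           (ctoks.foldl langStep ((hdrApply (segs.foldl segStep ([], false)) csp).1, none)).2)).1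
        = renderOut (ts.foldl gStep (segs, csp, ctoks)) := by
  induction ts with
  | nil =>
    intro segs csp ctoks h1 h2
    simp only [List.foldl_nil, renderOut, List.foldl_append, List.foldl_cons]
    rw [segStep_parts]
  | cons t ts ih =>
    intro segs csp ctoks h1 h2
    simp only [List.foldl_cons]
    rcases hsp : tokGet t "speaker" with _ | s
    · -- token has no speaker: stays in the current segment
      rw [aStep_keep _ _ _ _ (Or.inl hsp)]
      have hg : gStep (segs, csp, ctoks) t = (segs, csp, ctoks ++ [t]) := by
        simp [gStep, hsp]
      rw [hg]
      have := ih segs csp (ctoks ++ [t]) h1 (fun _ => by simp)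
      simpa [List.foldl_append] using this
    · by_cases hne : some s = csp
      · -- same speaker: stays in the current segment
        rw [aStep_keep _ _ _ _ (Or.inr (hsp.trans hne))]
        have hg : gStep (segs, csp, ctoks) t = (segs, csp, ctoks ++ [t]) := by
          simp [gStep, hsp, ← hne]
        rw [hg]
        have := ih segs csp (ctoks ++ [t]) h1 (fun _ => by simp)
        simpa [List.foldl_append] using this
      · -- new speaker: flush the current segment (if nonempty) and start a new one
        rw [aStep_new _ _ _ _ _ hsp hne]
        have hg : gStep (segs, csp, ctoks) t =
            ((if ctoks ≠ [] then segs ++ [(csp, ctoks)] else segs), some s, [t]) := by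
          simp [gStep, hsp, hne]
        rw [hg]
        by_cases hct : ctoks = []
        · -- current segment empty ⟹ csp = none and no header yet
          have hcsp : csp = none := by
            by_contra hc
            exact (h2 hc) hct
          subst hcsp
          have hR2 : (segs.foldl segStep ([], false)).2 = false := by
            by_contra hc
            exact (h1 (by simpa using hc)) rfl
          have := ih segs (some s) [t] (fun _ => by simp) (fun _ => by simp)
          simp only [hdrApply, hR2, if_neg (Bool.false_ne_true), hct, List.foldl_cons,
            List.foldl_nil] at this ⊢
          simpa [hR2] using this
        · -- flush
          have := ih (segs ++ [(csp, ctoks)]) (some s) [t] (fun _ => by simp) (fun _ => by simp)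
          simp only [if_pos hct, List.foldl_cons, List.foldl_nil] at this ⊢
          rw [List.foldl_append] at this
          simp only [List.foldl_cons, List.foldl_nil] at this
          -- rewrite the flushed render state in `this`
          have hparts := segStep_parts (segs.foldl segStep ([], false)) csp ctoks
          have hflag := segStep_flag (segs.foldl segStep ([], false)) csp ctoks
          rcases hcspc : csp with _ | c
          · -- csp = none: header flag of flushed state is the old flag, which is false
            have hR2 : (segs.foldl segStep ([], false)).2 = false := by
              by_contra hc
              exact (h1 (by simpa using hc)) hcspc
            subst hcspc
            simp only [hdrApply] at this ⊢
            rw [hparts, hflag] at this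
            simpa [hR2, hdrApply] using this
          · subst hcspc
            simp only [hdrApply] at this ⊢
            rw [hparts, hflag] at this
            simpa [hdrApply] using this

theorem render_tokens_spec : Claim_equal_render_tokens := by
  intro f nf _ _
  unfold Spec_render_tokens render_tokens render_tokens_alt
  have h := key_invariant (f ++ nf) [] none [] (by simp [List.foldl_nil]) (fun hc => absurd rfl hc)
  simp only [List.foldl_nil, hdrApply] at h
  rcases hst : (f ++ nf).foldl gStep ([], none, []) with ⟨segs, csp, ctoks⟩
  rw [hst] at h
  simp only [renderOut] at h
  rw [h]
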